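-- pv_equiv track=rewrite | github.com/sambleu13/brush-up-coding_interviews-with-python | hashsets/exclusive_products_exercise.py | exclusive_products
-- ===== SOURCE A (Python) =====
-- def exclusive_products(inventory1, inventory2):
--     # implement this
--     inventory1 = [product.upper() for product in inventory1]
--     inventory2 = [product.upper() for product in inventory2]
--     inv1 = set(inventory1)
--     inv2 = set(inventory2)
--     unique_in_1 = inv1 - inv2
--     unique_in_2 = inv2 - inv1
--     return (sorted(list(unique_in_1)), sorted(list(unique_in_2)))
--
-- inventory1 = []
--
-- inventory2 = ["Dress", "Skirt", "Coat"]
-- ===== SOURCE B (Python) =====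
-- def exclusive_products(inventory1, inventory2):
--     # Two-pointer walk over the two sorted, deduplicated uppercase inventories:
--     # no set-difference operations; each exclusive list is emitted already sorted.
--     a = sorted(set(p.upper() for p in inventory1))
--     b = sorted(set(p.upper() for p in inventory2))
--     only1, only2 = [], []
--     i = j = 0
--     while i < len(a) and j < len(b):
--         if a[i] == b[j]:
--             i += 1
--             j += 1
--         elif a[i] < b[j]:
--             only1.append(a[i])
--             i += 1
--         else:
--             only2.append(b[j])
--             j += 1
--     only1.extend(a[i:])
--     only2.extend(b[j:])
--     return (only1, only2)
-- ===== Notes on version B (the rewrite author's own statement) =====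
-- stated objective: alternative
-- what changed: replaces the two set-difference operations with a single two-pointer merge walk over the two sorted deduplicated inventories, emitting each exclusive list already in sorted order
import Mathlib
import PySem

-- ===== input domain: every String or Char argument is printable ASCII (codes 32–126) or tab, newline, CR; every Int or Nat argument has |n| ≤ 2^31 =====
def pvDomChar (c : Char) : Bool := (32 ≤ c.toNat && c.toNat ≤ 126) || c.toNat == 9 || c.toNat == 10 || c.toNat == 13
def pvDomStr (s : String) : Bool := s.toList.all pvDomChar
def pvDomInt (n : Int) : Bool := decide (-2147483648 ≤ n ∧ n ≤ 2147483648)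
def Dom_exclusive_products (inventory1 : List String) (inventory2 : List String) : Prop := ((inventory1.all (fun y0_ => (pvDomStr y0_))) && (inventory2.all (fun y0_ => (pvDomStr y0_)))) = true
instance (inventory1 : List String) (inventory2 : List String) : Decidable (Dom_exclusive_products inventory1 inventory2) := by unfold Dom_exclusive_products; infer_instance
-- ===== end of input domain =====

-- B replaces A's two set-difference operations by a single two-pointer merge walk over the
-- two sorted deduplicated uppercase inventories (alternative decomposition, same cost).


-- ===== PORT A =====
def exclusive_products (inventory1 : List String) (inventory2 : List String) : List String × List String :=
  let inventory1' := inventory1.map PySem.Str.upper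
  let inventory2' := inventory2.map PySem.Str.upper
  let inv1 := PySem.Set.ofList inventory1'
  let inv2 := PySem.Set.ofList inventory2'
  let unique_in_1 := PySem.Set.diff inv1 inv2
  let unique_in_2 := PySem.Set.diff inv2 inv1
  (PySem.List.sorted unique_in_1 (fun x => x) false,
   PySem.List.sorted unique_in_2 (fun x => x) false)

-- ===== PORT B =====
-- the while loop of Source B: two pointers over the two sorted lists, with the trailing extends
def mergeExcl : List String → List String → List String × List String
  | [], bs => ([], bs)
  | x :: as, [] => (x :: as, [])
  | x :: as, y :: bs =>
    if x = y then mergeExcl as bs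
    else if x < y then
      let r := mergeExcl as (y :: bs); (x :: r.1, r.2)
    else
      let r := mergeExcl (x :: as) bs; (r.1, y :: r.2)
  termination_by as bs => as.length + bs.length

def exclusive_products_alt (inventory1 : List String) (inventory2 : List String) : List String × List String :=
  let a := PySem.List.sorted (PySem.Set.ofList (inventory1.map PySem.Str.upper)) (fun x => x) false
  let b := PySem.List.sorted (PySem.Set.ofList (inventory2.map PySem.Str.upper)) (fun x => x) false
  mergeExcl a b

-- ===== PRECONDITION & SPEC =====
def Spec_exclusive_products (inventory1 : List String) (inventory2 : List String) (out : List String × List String) : Prop := out = exclusive_products_alt inventory1 inventory2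
instance (inventory1 : List String) (inventory2 : List String) (out : List String × List String) : Decidable (Spec_exclusive_products inventory1 inventory2 out) := by unfold Spec_exclusive_products; infer_instance

-- ===== CLAIM (what is proved, stated in full; the proofs are below) =====
def Claim_equal_exclusive_products : Prop := ∀ (inventory1 : List String) (inventory2 : List String), Dom_exclusive_products inventory1 inventory2 → Spec_exclusive_products inventory1 inventory2 (exclusive_products inventory1 inventory2)

-- ===== LEMMAS AND PROOFS =====

-- dropping a head that cannot occur in l from the membership test of a not-in filter
theorem filter_notmem_cons (y : String) (l L : List String) (h : ∀ a ∈ l, a ≠ y) :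
    List.filter (fun z => decide (¬ z ∈ y :: L)) l = List.filter (fun z => decide (¬ z ∈ L)) l :=
  List.filter_congr (fun a hma => by
    have hne := h a hma
    simp only [List.mem_cons, decide_eq_decide]
    constructor
    · intro hno hh; exact hno (Or.inr hh)
    · rintro hno (h' | hh)
      · exact absurd h' hne
      · exact hno hh)

-- the two-pointer walk on strictly sorted lists computes the two mutual-difference filters
theorem mergeExcl_spec (as bs : List String)
    (ha : as.Pairwise (· < ·)) (hb : bs.Pairwise (· < ·)) :
    mergeExcl as bs =
      (as.filter (fun z => decide (¬ z ∈ bs)), bs.filter (fun z => decide (¬ z ∈ as))) := by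
  fun_induction mergeExcl as bs with
  | case1 bs => simp
  | case2 x as => simp
  | case3 as y bs ih =>
    rw [List.pairwise_cons] at ha hb
    rw [ih ha.2 hb.2]
    rw [List.filter_cons_of_neg (by simp), List.filter_cons_of_neg (by simp),
        filter_notmem_cons y as bs (fun a hma => ne_of_gt (ha.1 a hma)),
        filter_notmem_cons y bs as (fun b hmb => ne_of_gt (hb.1 b hmb))]
  | case4 x as y bs hne hlt r ih =>
    rw [List.pairwise_cons] at ha hb
    have hr : r = mergeExcl as (y :: bs) := rfl
    rw [hr, ih ha.2 (List.pairwise_cons.mpr hb)]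
    have hxnot : ¬ x ∈ y :: bs := by
      simp only [List.mem_cons]
      rintro (h' | h')
      · exact hne h'
      · exact lt_asymm hlt (hb.1 _ h')
    rw [List.filter_cons_of_pos (p := fun z => decide (¬ z ∈ y :: bs)) (by simpa using hxnot),
        filter_notmem_cons x (y :: bs) as (by
          intro b hmb
          rcases List.mem_cons.mp hmb with h' | h'
          · rw [h']; exact fun hyx => hne hyx.symm
          · exact ne_of_gt (lt_trans hlt (hb.1 _ h')))]
  | case5 x as y bs hne hnlt r ih =>
    rw [List.pairwise_cons] at ha hb
    have hr : r = mergeExcl (x :: as) bs := rfl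
    rw [hr, ih (List.pairwise_cons.mpr ha) hb.2]
    have hylt : y < x := lt_of_le_of_ne (not_lt.mp hnlt) (fun h' => hne h'.symm)
    have hynot : ¬ y ∈ x :: as := by
      simp only [List.mem_cons]
      rintro (h' | h')
      · exact hne h'.symm
      · exact lt_asymm hylt (ha.1 _ h')
    rw [List.filter_cons_of_pos (p := fun z => decide (¬ z ∈ x :: as)) (by simpa using hynot),
        filter_notmem_cons y (x :: as) bs (by
          intro a hma
          rcases List.mem_cons.mp hma with h' | h'
          · rw [h']; exact hne
          · exact ne_of_gt (lt_trans hylt (ha.1 _ h')))]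

-- sorted set difference = the corresponding filter of the sorted set
theorem sorted_diff_eq (l1 l2 : List String) :
    PySem.List.sorted (PySem.Set.diff (PySem.Set.ofList l1) (PySem.Set.ofList l2)) (fun x => x) false
      = (PySem.List.sorted (PySem.Set.ofList l1) (fun x => x) false).filter
          (fun z => decide (¬ z ∈ PySem.List.sorted (PySem.Set.ofList l2) (fun x => x) false)) := by
  apply PySem.List.sorted_eq_of_perm_of_pairwise_lt
  · apply (List.perm_ext_iff_of_nodup
      (List.Nodup.filter _ ((PySem.List.sorted_perm _ _ _).nodup_iff.mpr (PySem.Set.nodup_ofList l1)))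
      (PySem.Set.nodup_diff _ _ (PySem.Set.nodup_ofList l1))).mpr
    intro a
    simp only [List.mem_filter, PySem.List.mem_sorted, PySem.Set.mem_diff, decide_eq_true_eq]
  · exact List.Pairwise.filter _ (PySem.List.sorted_ofList_pairwise_lt l1)

-- ===== VERDICT (by name: the statement is the Claim_ definition above) =====
theorem exclusive_products_spec : Claim_equal_exclusive_products := by
  intro inv1 inv2 _
  show (PySem.List.sorted (PySem.Set.diff (PySem.Set.ofList (inv1.map PySem.Str.upper))
          (PySem.Set.ofList (inv2.map PySem.Str.upper))) (fun x => x) false,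
        PySem.List.sorted (PySem.Set.diff (PySem.Set.ofList (inv2.map PySem.Str.upper))
          (PySem.Set.ofList (inv1.map PySem.Str.upper))) (fun x => x) false)
      = mergeExcl (PySem.List.sorted (PySem.Set.ofList (inv1.map PySem.Str.upper)) (fun x => x) false)
          (PySem.List.sorted (PySem.Set.ofList (inv2.map PySem.Str.upper)) (fun x => x) false)
  rw [mergeExcl_spec _ _ (PySem.List.sorted_ofList_pairwise_lt _)
        (PySem.List.sorted_ofList_pairwise_lt _),
      sorted_diff_eq, sorted_diff_eq]
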